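-- pv_equiv track=rewrite | github.com/jirkajirka6565/THRUST-STAND | build/gui.py | FindArduino
-- ===== SOURCE A (Python) =====
-- def FindArduino(portsFound):
--     comport = "no port"
--     numOfPorts = len(portsFound)
--
--     for i in range(0, numOfPorts):
--         port = portsFound[i]
--         strPort = str(port)
--
--         if "Arduino" in strPort:
--             splitPort = strPort.split(" ")
--             comport = splitPort[0]
--
--     return comport
-- ===== SOURCE B (Python) =====
-- def FindArduino(portsFound):
--     for port in reversed(portsFound):
--         strPort = str(port)
--         if "Arduino" in strPort:
--             return strPort.split(" ")[0]
--     return "no port"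
-- ===== Notes on version B (the rewrite author's own statement) =====
-- stated objective: simpler
-- what changed: Replaces A's full forward scan with an accumulator that each match overwrites by a reversed traversal that returns the first (i.e. last overall) match's first space-split token immediately, with no accumulator variable.
import Mathlib
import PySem

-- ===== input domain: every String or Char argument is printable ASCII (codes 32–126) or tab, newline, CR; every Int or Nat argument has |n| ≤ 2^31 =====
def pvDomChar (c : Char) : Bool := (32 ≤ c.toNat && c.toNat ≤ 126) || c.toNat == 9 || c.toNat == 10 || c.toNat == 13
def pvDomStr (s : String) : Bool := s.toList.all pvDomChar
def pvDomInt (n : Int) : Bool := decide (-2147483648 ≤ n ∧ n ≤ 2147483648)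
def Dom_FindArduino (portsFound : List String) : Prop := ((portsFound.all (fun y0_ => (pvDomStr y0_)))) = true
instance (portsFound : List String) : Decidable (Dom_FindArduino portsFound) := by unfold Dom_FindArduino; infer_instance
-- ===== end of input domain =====

-- B replaces A's forward scan with an overwritten accumulator by a reversed traversal with early return (simpler, no accumulator).


-- ===== PORT A =====
-- loop over the elements in order, overwriting comport on each match; split(" ")[0] is headD ""
-- (split with a nonempty separator always yields at least one piece, so [0] never raises)
def FindArduino (portsFound : List String) : String :=
  portsFound.foldl
    (fun comport strPort =>
      if PySem.Str.isIn "Arduino" strPort then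
        ((PySem.Str.split? strPort " ").getD []).headD ""
      else comport)
    "no port"

-- ===== PORT B =====
-- reversed traversal, early return on the first match
def FindArduinoRevGo : List String → String
  | [] => "no port"
  | strPort :: rest =>
      if PySem.Str.isIn "Arduino" strPort then
        ((PySem.Str.split? strPort " ").getD []).headD ""
      else FindArduinoRevGo rest

def FindArduino_alt (portsFound : List String) : String :=
  FindArduinoRevGo portsFound.reverse

-- ===== PRECONDITION & SPEC =====
def Spec_FindArduino (portsFound : List String) (out : String) : Prop := out = FindArduino_alt portsFound
instance (portsFound : List String) (out : String) : Decidable (Spec_FindArduino portsFound out) := by unfold Spec_FindArduino; infer_instance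

-- ===== CLAIM (what is proved, stated in full; the proofs are below) =====
def Claim_equal_FindArduino : Prop := ∀ (portsFound : List String), Dom_FindArduino portsFound → Spec_FindArduino portsFound (FindArduino portsFound)

-- ===== LEMMAS AND PROOFS =====
-- the one loop step A performs
def pvStep (comport strPort : String) : String :=
  if PySem.Str.isIn "Arduino" strPort then
    ((PySem.Str.split? strPort " ").getD []).headD ""
  else comport

-- pushing one step through the reversed traversal
theorem revGo_append (xs : List String) (p acc0 : String) :
    (xs ++ [p]).foldr (fun s r => if PySem.Str.isIn "Arduino" s then ((PySem.Str.split? s " ").getD []).headD "" else r) acc0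
    = xs.foldr (fun s r => if PySem.Str.isIn "Arduino" s then ((PySem.Str.split? s " ").getD []).headD "" else r) (pvStep acc0 p) := by
  induction xs with
  | nil => simp [pvStep]
  | cons q qs ih =>
      simp only [List.cons_append, List.foldr_cons]
      rw [ih]

-- FindArduinoRevGo as a foldr with base acc
theorem revGo_eq_foldr (xs : List String) :
    FindArduinoRevGo xs
    = xs.foldr (fun s r => if PySem.Str.isIn "Arduino" s then ((PySem.Str.split? s " ").getD []).headD "" else r) "no port" := by
  induction xs with
  | nil => rfl
  | cons q qs ih => simp [FindArduinoRevGo, ih]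

theorem foldl_eq_revGo (xs : List String) (acc : String) :
    xs.foldl pvStep acc
    = xs.reverse.foldr (fun s r => if PySem.Str.isIn "Arduino" s then ((PySem.Str.split? s " ").getD []).headD "" else r) acc := by
  induction xs generalizing acc with
  | nil => rfl
  | cons q qs ih =>
      simp only [List.foldl_cons, List.reverse_cons]
      rw [ih, revGo_append]

-- ===== VERDICT (by name: the statement is the Claim_ definition above) =====
theorem FindArduino_spec : Claim_equal_FindArduino := by
  intro portsFound _
  unfold Spec_FindArduino FindArduino FindArduino_alt
  rw [revGo_eq_foldr]
  exact foldl_eq_revGo portsFound "no port"
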